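-- pv_equiv track=rewrite | github.com/liupengsay/PyIsTheBestLang | src/dp/digital_dp.py | count_num_dp
-- ===== SOURCE A (Python) =====
-- from functools import lru_cache
--
-- def count_num_dp(num, d):
--
--     # 模板: 使用进制计算 1 到 num 内不含数位 d 的数字个数
--     assert 0 <= d <= 9
--
--     @lru_cache(None)
--     def dfs(i: int, is_limit: bool, is_num: bool) -> int:
--         if i == m:
--             return int(is_num)
--
--         res = 0
--         if not is_num:  # 可以跳过当前数位
--             res = dfs(i + 1, False, False)
--         up = int(s[i]) if is_limit else 9
--         for x in range(0 if is_num else 1, up + 1):  # 枚举要填入的数字 d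
--             if x != d:
--                 res += dfs(i + 1, is_limit and x == up, True)
--         return res
--
--     s = str(num)
--     m = len(s)
--     return dfs(0, True, False)
-- ===== SOURCE B (Python) =====
-- def count_num_dp(num, d):
--     # Count numbers in [1, num] that contain no digit d: one left-to-right
--     # tight pass over str(num) plus a closed-form count of shorter numbers.
--     assert 0 <= d <= 9
--     if num <= 0:
--         return 0
--     s = str(num)
--     m = len(s)
--     first = 9 if d == 0 else 8          # choices for a nonzero leading digit != d
--     ans = sum(first * 9 ** (L - 1) for L in range(1, m))   # all shorter lengths
--     for i, ch in enumerate(s):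
--         cur = int(ch)
--         lo = 1 if i == 0 else 0
--         cnt = sum(1 for x in range(lo, cur) if x != d)
--         ans += cnt * 9 ** (m - 1 - i)   # prefix strictly below num at position i
--         if cur == d:                    # tight path dies here
--             return ans
--     return ans + 1                      # num itself contains no d
-- ===== Notes on version B (the rewrite author's own statement) =====
-- stated objective: simpler
-- what changed: Replaced the memoized recursive digit-DP (dfs over position/tight/started flags) by a single left-to-right tight pass over str(num) plus a closed-form count of shorter numbers, with an early return once a digit of num equals d.
import Mathlib
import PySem

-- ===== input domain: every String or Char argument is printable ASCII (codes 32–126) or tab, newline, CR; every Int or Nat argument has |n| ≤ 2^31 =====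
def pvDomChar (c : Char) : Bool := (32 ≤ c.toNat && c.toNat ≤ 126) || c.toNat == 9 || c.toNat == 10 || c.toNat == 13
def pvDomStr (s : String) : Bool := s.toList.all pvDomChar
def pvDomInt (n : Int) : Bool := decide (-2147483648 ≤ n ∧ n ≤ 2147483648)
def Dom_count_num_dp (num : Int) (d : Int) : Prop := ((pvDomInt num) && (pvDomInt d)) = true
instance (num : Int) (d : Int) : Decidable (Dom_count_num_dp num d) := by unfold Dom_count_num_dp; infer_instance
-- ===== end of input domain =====

-- B replaces A's memoized digit-DP recursion by a single tight left-to-right pass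
-- over the digits plus a closed-form count of shorter numbers (objective: simpler).

-- ===== PORT A =====

-- int(s[i]) for the single char s[i]; exact for '0'..'9', which Pre_ guarantees
def pvCharInt (c : Char) : Int := (c.toNat : Int) - 48

-- dfs(i, is_limit, is_num): recursion over the suffix of digits s[i:].
-- lru_cache: the repeated recursive call dfs(i+1, False, True) (the only state the
-- loop asks for more than once) is computed once per level via the shared `let`.
def pvDfs (d : Int) (ds : List Int) (isLimit : Bool) (isNum : Bool) : Int :=
  match ds with
  | [] => if isNum then 1 else 0
  | cur :: rest =>
    let res := if isNum then 0 else pvDfs d rest false false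
    let up := if isLimit then cur else 9
    let freeNum := pvDfs d rest false true
    (PySem.List.pyRange (if isNum then 0 else 1) (up + 1) 1).foldl
      (fun acc x => if x ≠ d then
          acc + (if isLimit && decide (x = up) then pvDfs d rest true true else freeNum)
        else acc)
      res

def count_num_dp (num : Int) (d : Int) : Int :=
  let s := PySem.Int.toStr num
  let ds := s.toList.map pvCharInt
  pvDfs d ds true false

-- ===== PORT B =====

-- the loop 'for i, ch in enumerate(s)' with early return at cur == d
def pvScan (d : Int) (ds : List Int) (isFirst : Bool) (ans : Int) : Int :=
  match ds with
  | [] => ans + 1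
  | cur :: rest =>
    let lo : Int := if isFirst then 1 else 0
    let cnt : Int := ((PySem.List.pyRange lo cur 1).filter (fun x => x ≠ d)).length
    let ans := ans + cnt * 9 ^ rest.length   -- 9 ** (m - 1 - i)
    if cur = d then ans else pvScan d rest false ans

def count_num_dp_alt (num : Int) (d : Int) : Int :=
  if num ≤ 0 then 0 else
  let ds := (PySem.Int.toStr num).toList.map pvCharInt
  let m : Int := ds.length
  let first : Int := if d = 0 then 9 else 8
  let ans := ((PySem.List.pyRange 1 m 1).map (fun L => first * 9 ^ (L - 1).toNat)).sum
  pvScan d ds true ans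

-- ===== PRECONDITION & SPEC =====
-- Pre_ excludes d outside [0,9] (A's assert raises AssertionError) and num < 0
-- (A calls int('-') on the sign character, raising ValueError).
def Pre_count_num_dp (num : Int) (d : Int) : Prop := 0 ≤ num ∧ 0 ≤ d ∧ d ≤ 9
instance (num : Int) (d : Int) : Decidable (Pre_count_num_dp num d) := by unfold Pre_count_num_dp; infer_instance
def pvWitness_count_num_dp : Int × Int := (2025, 3)

def Spec_count_num_dp (num : Int) (d : Int) (out : Int) : Prop := out = count_num_dp_alt num d
instance (num : Int) (d : Int) (out : Int) : Decidable (Spec_count_num_dp num d out) := by unfold Spec_count_num_dp; infer_instance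

-- ===== CLAIM (what is proved, stated in full; the proofs are below) =====
def Claim_equal_count_num_dp : Prop := ∀ (num : Int) (d : Int), Dom_count_num_dp num d → Pre_count_num_dp num d → Spec_count_num_dp num d (count_num_dp num d)

-- ===== LEMMAS AND PROOFS =====

-- a fold that adds the constant C once per element with x ≠ d
theorem pvFoldCount (d C init : Int) (l : List Int) :
    l.foldl (fun acc x => if x ≠ d then acc + C else acc) init
      = init + (((l.filter (fun x => x ≠ d)).length : Int)) * C := by
  rw [PySem.List.foldl_ite_eq_foldl_filter]
  rw [show (fun (acc x : Int) => acc + C) = (fun acc x => acc + (fun (_ : Int) => C) x) from rfl,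
     PySem.List.foldl_add]
  simp [mul_comm]

-- F: the free (not tight) branch counts 9^(remaining positions)
theorem pvDfs_free_num (d : Int) (hd0 : 0 ≤ d) (hd9 : d ≤ 9) :
    ∀ ds : List Int, pvDfs d ds false true = 9 ^ ds.length := by
  intro ds
  induction ds with
  | nil => simp [pvDfs]
  | cons cur rest ih =>
    have hr : PySem.List.pyRange 0 10 1 = [0,1,2,3,4,5,6,7,8,9] := by decide
    simp only [pvDfs, Bool.false_and, ih, Bool.false_eq_true, if_false, if_true]
    rw [show ((9:Int)+1) = 10 by norm_num, hr]
    interval_cases d <;> norm_num [List.foldl] <;> ring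

-- G: the skip branch counts all shorter numbers without digit d
theorem pvDfs_skip (d : Int) (hd0 : 0 ≤ d) (hd9 : d ≤ 9) :
    ∀ ds : List Int, pvDfs d ds false false =
      ((PySem.List.pyRange 1 ((ds.length : Int) + 1) 1).map
        (fun L => (if d = 0 then (9:Int) else 8) * 9 ^ (L - 1).toNat)).sum := by
  intro ds
  induction ds with
  | nil => simp [pvDfs]
  | cons cur rest ih =>
    have hsplit : PySem.List.pyRange 1 ((rest.length : Int) + 1 + 1) 1
        = PySem.List.pyRange 1 ((rest.length : Int) + 1) 1 ++ [(rest.length : Int) + 1] :=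
      PySem.List.pyRange_one_succ_right (by omega)
    have hr : PySem.List.pyRange 1 10 1 = [1,2,3,4,5,6,7,8,9] := by decide
    simp only [pvDfs, Bool.false_and, pvDfs_free_num d hd0 hd9, Bool.false_eq_true,
      if_false, List.length_cons]
    rw [show ((9:Int)+1) = 10 by norm_num, hr]
    rw [show (((rest.length + 1 : Nat) : Int) + 1) = ((rest.length : Int) + 1 + 1) by push_cast; ring]
    rw [hsplit, List.map_append, List.sum_append, ← ih]
    have hpow : (((rest.length : Int) + 1 - 1).toNat) = rest.length := by omega
    simp only [List.map_cons, List.map_nil, List.sum_cons, List.sum_nil, hpow]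
    interval_cases d <;> norm_num [List.foldl] <;> ring

-- T: the tight branch of A equals B's scan continuation
theorem pvDfs_tight (d : Int) (hd0 : 0 ≤ d) (hd9 : d ≤ 9) :
    ∀ ds : List Int, (∀ x ∈ ds, 0 ≤ x) → ∀ ans : Int,
      pvScan d ds false ans = ans + pvDfs d ds true true := by
  intro ds
  induction ds with
  | nil => intro _ ans; simp [pvScan, pvDfs]
  | cons cur rest ih =>
    intro hnn ans
    have hcur : 0 ≤ cur := hnn cur List.mem_cons_self
    have hsplit : PySem.List.pyRange 0 (cur + 1) 1
        = PySem.List.pyRange 0 cur 1 ++ [cur] :=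
      PySem.List.pyRange_one_succ_right hcur
    simp only [pvDfs, Bool.true_and, if_true]
    rw [hsplit, List.foldl_append]
    simp only [List.foldl_cons, List.foldl_nil, decide_true, if_true]
    rw [PySem.List.foldl_congr_mem
      (f := fun acc x => if x ≠ d then
          acc + (if decide (x = cur) = true then pvDfs d rest true true else pvDfs d rest false true)
        else acc)
      (init := 0) (l := PySem.List.pyRange 0 cur 1)
      (g := fun acc x => if x ≠ d then acc + 9 ^ rest.length else acc)
      (by intro acc x hx
          have hxc : x < cur := (PySem.List.mem_pyRange_one.mp hx).2
          have hd' : decide (x = cur) = false := by simp; omega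
          simp only [hd', Bool.false_eq_true, if_false, pvDfs_free_num d hd0 hd9])]
    rw [pvFoldCount]
    simp only [pvScan, Bool.false_eq_true, if_false]
    by_cases hcd : cur = d
    · rw [if_pos hcd, if_neg (by simp [hcd])]
      ring
    · rw [if_neg hcd, if_pos hcd]
      rw [ih (fun x hx => hnn x (List.mem_cons_of_mem _ hx))]
      ring

theorem pvDigitChar_bounds (k : Nat) (hk : k < 10) :
    0 ≤ pvCharInt (Nat.digitChar k) ∧ pvCharInt (Nat.digitChar k) ≤ 9 := by
  interval_cases k <;> decide

theorem pvDigitChar_pos (k : Nat) (hk0 : 0 < k) (hk : k < 10) :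
    1 ≤ pvCharInt (Nat.digitChar k) := by
  interval_cases k <;> decide

theorem pvToDigitsCore_mem (f : Nat) :
    ∀ (n : Nat) (l : List Char), ∀ c ∈ Nat.toDigitsCore 10 f n l,
      c ∈ l ∨ ∃ k, k < 10 ∧ c = Nat.digitChar k := by
  induction f with
  | zero => intro n l c hc; exact Or.inl hc
  | succ f ih =>
    intro n l c hc
    simp only [Nat.toDigitsCore] at hc
    by_cases h : n / 10 = 0
    · rw [if_pos h] at hc
      rcases List.mem_cons.mp hc with hc | hc
      · exact Or.inr ⟨n % 10, Nat.mod_lt _ (by norm_num), hc⟩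
      · exact Or.inl hc
    · rw [if_neg h] at hc
      rcases ih _ _ c hc with h' | h'
      · rcases List.mem_cons.mp h' with h' | h'
        · exact Or.inr ⟨n % 10, Nat.mod_lt _ (by norm_num), h'⟩
        · exact Or.inl h'
      · exact Or.inr h'

theorem pvToDigitsCore_head (f : Nat) :
    ∀ (n : Nat) (l : List Char), 0 < n → n ≤ f →
      ∃ k tl, 0 < k ∧ k < 10 ∧ Nat.toDigitsCore 10 f n l = Nat.digitChar k :: tl := by
  induction f with
  | zero => intro n l hn hf; omega
  | succ f ih =>
    intro n l hn hf
    simp only [Nat.toDigitsCore]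
    by_cases h : n / 10 = 0
    · refine ⟨n % 10, l, ?_, Nat.mod_lt _ (by norm_num), by rw [if_pos h]⟩
      have : n < 10 := Nat.lt_of_div_eq_zero (by norm_num) h
      omega
    · rw [if_neg h]
      exact ih (n / 10) _ (Nat.pos_of_ne_zero h) (by omega)

-- digits of a positive nat: nonempty, all in [0,9], leading digit ≥ 1
theorem toDigits_props (n : Nat) (hn : 0 < n) :
    ∃ c0 tl, Nat.toDigits 10 n = c0 :: tl ∧ 1 ≤ pvCharInt c0 ∧ pvCharInt c0 ≤ 9 ∧
      ∀ c ∈ tl, 0 ≤ pvCharInt c ∧ pvCharInt c ≤ 9 := by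
  obtain ⟨k, tl, hk0, hk10, heq⟩ := pvToDigitsCore_head (n + 1) n [] hn (by omega)
  refine ⟨Nat.digitChar k, tl, heq, pvDigitChar_pos k hk0 hk10, (pvDigitChar_bounds k hk10).2, ?_⟩
  intro c hc
  have hmem : c ∈ Nat.toDigitsCore 10 (n + 1) n [] := by
    rw [heq]; exact List.mem_cons_of_mem _ hc
  rcases pvToDigitsCore_mem (n + 1) n [] c hmem with h | ⟨k', hk', hck⟩
  · simp at h
  · exact hck ▸ pvDigitChar_bounds k' hk'

-- ===== VERDICT (by name: the statement is the Claim_ definition above) =====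
theorem count_num_dp_spec : Claim_equal_count_num_dp := by
  unfold Claim_equal_count_num_dp
  intro num d _ hpre
  obtain ⟨hnum, hd0, hd9⟩ := hpre
  unfold Spec_count_num_dp
  rcases eq_or_lt_of_le hnum with h0 | hpos
  · -- num = 0: A returns 0 (empty top loop), B returns 0 (num ≤ 0 guard)
    subst h0
    have hch : PySem.Int.toChars 0 = ['0'] := by decide
    have hnil : PySem.List.pyRange 1 (0 + 1) 1 = [] :=
      PySem.List.pyRange_one_eq_nil (by norm_num)
    simp [count_num_dp, count_num_dp_alt, PySem.Int.toList_toStr, hch, pvCharInt, pvDfs]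
  · -- num ≥ 1
    obtain ⟨c0, tl, htd, hc0lo, hc0hi, htl⟩ := toDigits_props num.toNat (by omega)
    have hchars : (PySem.Int.toStr num).toList = c0 :: tl := by
      rw [PySem.Int.toList_toStr]
      unfold PySem.Int.toChars
      rw [if_neg (by omega)]
      exact htd
    have hrsnn : ∀ x ∈ tl.map pvCharInt, 0 ≤ x := by
      intro x hx
      obtain ⟨c, hc, rfl⟩ := List.mem_map.mp hx
      exact (htl c hc).1
    -- abbreviations
    set c : Int := pvCharInt c0 with hc
    set rs : List Int := tl.map pvCharInt with hrs
    -- LHS: A's dfs on c :: rs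
    have hsplit : PySem.List.pyRange 1 (c + 1) 1 = PySem.List.pyRange 1 c 1 ++ [c] :=
      PySem.List.pyRange_one_succ_right (by omega)
    have hlhs : count_num_dp num d =
        pvDfs d rs false false
          + ((PySem.List.pyRange 1 c 1).filter (fun x => x ≠ d)).length * 9 ^ rs.length
          + (if c = d then 0 else pvDfs d rs true true) := by
      simp only [count_num_dp, hchars, List.map_cons, ← hc, ← hrs]
      simp only [pvDfs, Bool.true_and, Bool.false_eq_true, if_false, if_true]
      rw [hsplit, List.foldl_append]
      simp only [List.foldl_cons, List.foldl_nil, decide_true, if_true]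
      rw [PySem.List.foldl_congr_mem
        (f := fun acc x => if x ≠ d then
            acc + (if decide (x = c) = true then pvDfs d rs true true else pvDfs d rs false true)
          else acc)
        (init := pvDfs d rs false false) (l := PySem.List.pyRange 1 c 1)
        (g := fun acc x => if x ≠ d then acc + 9 ^ rs.length else acc)
        (by intro acc x hx
            have hxc : x < c := (PySem.List.mem_pyRange_one.mp hx).2
            have hd' : decide (x = c) = false := by simp; omega
            simp only [hd', Bool.false_eq_true, if_false, pvDfs_free_num d hd0 hd9])]
      rw [pvFoldCount]
      by_cases hcd : c = d
      · rw [if_pos hcd, if_neg (by simp [hcd])]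
        ring
      · rw [if_neg hcd, if_pos hcd]
    -- RHS: B's scan on c :: rs
    have hans0 : ((PySem.List.pyRange 1 (((c :: rs).length : Nat) : Int) 1).map
          (fun L => (if d = 0 then (9:Int) else 8) * 9 ^ (L - 1).toNat)).sum
        = pvDfs d rs false false := by
      rw [pvDfs_skip d hd0 hd9]
      norm_num
    have hrhs : count_num_dp_alt num d =
        pvDfs d rs false false
          + ((PySem.List.pyRange 1 c 1).filter (fun x => x ≠ d)).length * 9 ^ rs.length
          + (if c = d then 0 else pvDfs d rs true true) := by
      simp only [count_num_dp_alt, hchars, List.map_cons, ← hc, ← hrs]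
      rw [if_neg (by omega)]
      rw [hans0]
      simp only [pvScan, if_true]
      by_cases hcd : c = d
      · rw [if_pos hcd, if_pos hcd]
        ring
      · rw [if_neg hcd, if_neg hcd]
        rw [pvDfs_tight d hd0 hd9 rs hrsnn]
    rw [hlhs, hrhs]
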